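-- pv_equiv track=rewrite | github.com/1914Jegx/cadmu | src/cadmu/modules/arch/pacman.py | _parse_pacman_query
-- ===== SOURCE A (Python) =====
-- from typing import Dict, Iterable, List, Sequence
--
-- def _parse_pacman_query(output: str) -> List[Dict[str, str]]:
--     records: List[Dict[str, str]] = []
--     current: Dict[str, str] = {}
--     current_key: str | None = None
--     for line in output.splitlines():
--         if not line.strip():
--             if current:
--                 records.append(current)
--                 current = {}
--                 current_key = None
--             continue
--         if line.startswith(" ") and current_key:
--             current[current_key] += " \n" + line.strip()
--             continue
--         if ":" in line:
--             key, value = line.split(":", 1)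
--             current_key = key.strip()
--             current[current_key] = value.strip()
--     if current:
--         records.append(current)
--     return records
-- ===== SOURCE B (Python) =====
-- from typing import Dict, List
--
--
-- def _split_blocks(lines):
--     blocks: List[List[str]] = []
--     cur: List[str] = []
--     for line in lines:
--         if line.strip():
--             cur.append(line)
--         elif cur:
--             blocks.append(cur)
--             cur = []
--     if cur:
--         blocks.append(cur)
--     return blocks
--
--
-- def _parse_block(block):
--     rec: Dict[str, str] = {}
--     key = None
--     for line in block:
--         if line.startswith(" ") and key:
--             rec[key] += " \n" + line.strip()
--         elif ":" in line:
--             k, v = line.split(":", 1)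
--             key = k.strip()
--             rec[key] = v.strip()
--     return rec
--
--
-- def _parse_pacman_query(output: str) -> List[Dict[str, str]]:
--     return [rec for rec in map(_parse_block, _split_blocks(output.splitlines())) if rec]
-- ===== Notes on version B (the rewrite author's own statement) =====
-- stated objective: simpler
-- what changed: Replaces A's single stateful pass threading records/current/current_key together by a two-stage decomposition: split the lines into blank-separated blocks, parse each block independently with a small helper, keep the non-empty records.
import Mathlib
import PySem

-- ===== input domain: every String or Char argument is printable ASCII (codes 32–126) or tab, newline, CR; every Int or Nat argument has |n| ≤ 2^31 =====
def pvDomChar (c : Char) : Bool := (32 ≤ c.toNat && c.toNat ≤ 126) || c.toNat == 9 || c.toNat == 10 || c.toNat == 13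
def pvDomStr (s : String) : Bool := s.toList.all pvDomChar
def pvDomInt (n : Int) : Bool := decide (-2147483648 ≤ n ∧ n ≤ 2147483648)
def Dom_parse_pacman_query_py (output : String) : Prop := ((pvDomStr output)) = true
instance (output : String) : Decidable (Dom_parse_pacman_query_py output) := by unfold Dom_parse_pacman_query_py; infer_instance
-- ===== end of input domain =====

-- B replaces A's single stateful pass (records/current/current_key threaded together) by a
-- two-stage decomposition: partition the lines into blank-separated blocks, parse each block
-- independently, keep the non-empty records (objective: simpler decomposition, same cost).

-- ===== PORT A =====

-- Python truthiness of `current_key` (None or "" are falsy)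
def pvCkTrue : Option String → Bool
  | none => false
  | some k => k != ""

-- A's for-loop as structural recursion over the lines, state = (records, current, current_key);
-- the final `if current: records.append(current)` is the [] case.
-- `current[current_key] += …` is ported as Dict.modify with default "" — the guard pvCkTrue
-- guarantees the key is present, so the default is never used.
def pvLoopA : List String → List (List (String × String)) → PySem.Dict String String →
    Option String → List (List (String × String))
  | [], recs, cur, _ => if cur.size ≠ 0 then recs ++ [cur.items] else recs
  | l :: ls, recs, cur, ck =>
    if PySem.Str.strip l = "" then
      if cur.size ≠ 0 then pvLoopA ls (recs ++ [cur.items]) PySem.Dict.empty none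
      else pvLoopA ls recs cur ck
    else if PySem.Str.startswith l " " && pvCkTrue ck then
      pvLoopA ls recs
        (cur.modify (ck.getD "") "" (fun v => v ++ " \n" ++ PySem.Str.strip l)) ck
    else if PySem.Str.isIn ":" l then
      match PySem.Str.splitMax? l ":" 1 with
      | some (k :: v :: _) =>
          pvLoopA ls recs (cur.insert (PySem.Str.strip k) (PySem.Str.strip v))
            (some (PySem.Str.strip k))
      | _ => pvLoopA ls recs cur ck   -- unreachable: ":" ∈ l gives exactly two pieces
    else pvLoopA ls recs cur ck

def parse_pacman_query_py (output : String) : List (List (String × String)) :=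
  pvLoopA (PySem.Str.splitlines output) [] PySem.Dict.empty none

-- ===== PORT B =====

-- Source B _split_blocks: fold over lines, state = (blocks, cur)
def pvSplitStep (st : List (List String) × List String) (l : String) :
    List (List String) × List String :=
  if PySem.Str.strip l ≠ "" then (st.1, st.2 ++ [l])
  else if st.2 ≠ [] then (st.1 ++ [st.2], []) else st

def pvSplitBlocks (lines : List String) : List (List String) :=
  let st := lines.foldl pvSplitStep ([], [])
  if st.2 ≠ [] then st.1 ++ [st.2] else st.1

-- Source B _parse_block: fold over the block's lines, state = (rec, key)
def pvStepB (st : PySem.Dict String String × Option String) (l : String) :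
    PySem.Dict String String × Option String :=
  if PySem.Str.startswith l " " && pvCkTrue st.2 then
    (st.1.modify (st.2.getD "") "" (fun v => v ++ " \n" ++ PySem.Str.strip l), st.2)
  else if PySem.Str.isIn ":" l then
    match PySem.Str.splitMax? l ":" 1 with
    | some (k :: v :: _) =>
        (st.1.insert (PySem.Str.strip k) (PySem.Str.strip v), some (PySem.Str.strip k))
    | _ => st
  else st

def pvParseBlock (b : List String) : List (String × String) :=
  (b.foldl pvStepB (PySem.Dict.empty, none)).1.items

-- Source B comprehension: parse every block, keep the non-empty records
def parse_pacman_query_py_alt (output : String) : List (List (String × String)) :=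
  ((pvSplitBlocks (PySem.Str.splitlines output)).map pvParseBlock).filter
    (fun r => !r.isEmpty)

-- ===== PRECONDITION & SPEC =====
def Spec_parse_pacman_query_py (output : String) (out : List (List (String × String))) : Prop := out = parse_pacman_query_py_alt output
instance (output : String) (out : List (List (String × String))) : Decidable (Spec_parse_pacman_query_py output out) := by unfold Spec_parse_pacman_query_py; infer_instance

-- ===== CLAIM (what is proved, stated in full; the proofs are below) =====
def Claim_equal_parse_pacman_query_py : Prop := ∀ (output : String), Dom_parse_pacman_query_py output → Spec_parse_pacman_query_py output (parse_pacman_query_py output)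

-- ===== LEMMAS AND PROOFS =====

-- state of B's block parser after the (still open) partial block b
def pvPB (b : List String) : PySem.Dict String String × Option String :=
  b.foldl pvStepB (PySem.Dict.empty, none)

-- remaining blocks produced from remaining lines ls with open partial block curb
def pvBlocksLoop : List String → List String → List (List String)
  | [], curb => if curb ≠ [] then [curb] else []
  | l :: ls, curb =>
    if PySem.Str.strip l ≠ "" then pvBlocksLoop ls (curb ++ [l])
    else if curb ≠ [] then curb :: pvBlocksLoop ls [] else pvBlocksLoop ls curb

lemma pvSplitBlocks_loop (ls : List String) : ∀ (blocks : List (List String)) (curb : List String),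
    (let st := ls.foldl pvSplitStep (blocks, curb);
     if st.2 ≠ [] then st.1 ++ [st.2] else st.1) = blocks ++ pvBlocksLoop ls curb := by
  induction ls with
  | nil =>
    intro blocks curb
    simp only [List.foldl_nil, pvBlocksLoop]
    split <;> simp_all
  | cons l ls ih =>
    intro blocks curb
    simp only [List.foldl_cons, pvBlocksLoop, pvSplitStep]
    by_cases h : PySem.Str.strip l ≠ ""
    · simp only [if_pos h]
      exact ih blocks (curb ++ [l])
    · simp only [if_neg h]
      by_cases hc : curb ≠ []
      · simp only [if_pos hc]
        rw [ih (blocks ++ [curb]) []]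
        simp
      · simp only [if_neg hc]
        exact ih blocks curb

-- invariant: whenever the block parser's key is set, that key is in the dict
lemma pvStepB_inv (st : PySem.Dict String String × Option String) (l : String)
    (ih : ∀ k, st.2 = some k → st.1.contains k = true) :
    ∀ k, (pvStepB st l).2 = some k → (pvStepB st l).1.contains k = true := by
  intro k hk
  unfold pvStepB at hk ⊢
  by_cases h1 : (PySem.Str.startswith l " " && pvCkTrue st.2) = true
  · rw [if_pos h1] at hk ⊢
    have hk' : st.2 = some k := hk
    show (st.1.modify (st.2.getD "") "" (fun v => v ++ " \n" ++ PySem.Str.strip l)).contains k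
      = true
    rw [PySem.Dict.contains_modify, hk']
    simp
  · rw [if_neg h1] at hk ⊢
    by_cases h2 : PySem.Str.isIn ":" l = true
    · rw [if_pos h2] at hk ⊢
      rcases h3 : PySem.Str.splitMax? l ":" 1 with _ | (_ | ⟨a, _ | ⟨c, rest⟩⟩)
      all_goals simp only [h3] at hk ⊢
      · exact ih k hk
      · exact ih k hk
      · exact ih k hk
      · cases hk
        exact PySem.Dict.contains_insert_self _ _ _
    · rw [if_neg h2] at hk ⊢
      exact ih k hk

lemma pvPB_inv (b : List String) :
    ∀ k, (pvPB b).2 = some k → (pvPB b).1.contains k = true := by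
  unfold pvPB
  induction b using List.reverseRecOn with
  | nil => simp
  | append_singleton b l ih =>
    rw [List.foldl_append, List.foldl_cons, List.foldl_nil]
    exact pvStepB_inv _ l ih

lemma pvContains_size_ne {d : PySem.Dict String String} {k : String}
    (h : d.contains k = true) : d.size ≠ 0 := by
  rcases d with ⟨items⟩
  cases items with
  | nil => simp [PySem.Dict.contains] at h
  | cons p rest => simp [PySem.Dict.size]

-- one non-blank line advances A's (current, current_key) exactly like B's pvStepB
lemma pvLoopA_step (l : String) (ls : List String) (recs : List (List (String × String)))
    (cur : PySem.Dict String String) (ck : Option String)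
    (h : ¬ PySem.Str.strip l = "") :
    pvLoopA (l :: ls) recs cur ck
      = pvLoopA ls recs (pvStepB (cur, ck) l).1 (pvStepB (cur, ck) l).2 := by
  rw [pvLoopA]
  unfold pvStepB
  simp only [if_neg h]
  split
  · simp
  · split
    · split <;> simp
    · simp

-- main invariant: A's loop from the state reached by the open block curb
lemma pvMain (ls : List String) : ∀ (curb : List String) (recs : List (List (String × String))),
    pvLoopA ls recs (pvPB curb).1 (pvPB curb).2
      = recs ++ ((pvBlocksLoop ls curb).map pvParseBlock).filter (fun r => !r.isEmpty) := by
  induction ls with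
  | nil =>
    intro curb recs
    rw [pvLoopA, pvBlocksLoop]
    by_cases hc : curb = []
    · subst hc
      simp [pvPB, PySem.Dict.size, PySem.Dict.empty]
    · simp only [hc, ne_eq, not_false_eq_true, if_pos, List.map_cons, List.map_nil,
        List.filter]
      have hpb : pvParseBlock curb = (pvPB curb).1.items := rfl
      by_cases hs : (pvPB curb).1.size ≠ 0
      · have : ¬ (pvPB curb).1.items.isEmpty = true := by
          simp [PySem.Dict.size] at hs
          simp [List.isEmpty_iff, hs]
        simp [hs, hpb, this]
      · have hi : (pvPB curb).1.items = [] := by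
          simp [PySem.Dict.size, List.length_eq_zero_iff] at hs
          exact hs
        simp [hs, hpb, hi]
  | cons l ls ih =>
    intro curb recs
    by_cases h : PySem.Str.strip l = ""
    · -- blank line
      rw [pvLoopA, if_pos h, pvBlocksLoop]
      simp only [h, ne_eq, not_true_eq_false, if_false]
      have hnil : pvPB ([] : List String) = (PySem.Dict.empty, none) := rfl
      by_cases hc : curb = []
      · subst hc
        simp only [hnil]
        simp only [PySem.Dict.size, PySem.Dict.empty, List.length_nil, not_true_eq_false]
        have := ih [] recs
        simpa [hnil] using this
      · simp only [if_pos hc]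
        have hpb2 : pvParseBlock curb = (pvPB curb).1.items := rfl
        by_cases hs : (pvPB curb).1.size ≠ 0
        · rw [if_pos hs]
          have := ih [] (recs ++ [(pvPB curb).1.items])
          simp only [hnil] at this
          rw [this]
          have hne : ¬ (pvPB curb).1.items.isEmpty = true := by
            simp only [PySem.Dict.size, ne_eq] at hs
            simp [List.isEmpty_iff, ← List.length_eq_zero_iff, hs]
          simp [hpb2, hne]
        · rw [if_neg hs]
          -- current is empty, hence items = [] and (by the invariant) key is none
          have hi : (pvPB curb).1.items = [] := by
            simp only [PySem.Dict.size, ne_eq, not_not, List.length_eq_zero_iff] at hs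
            exact hs
          have hck : (pvPB curb).2 = none := by
            rcases hk : (pvPB curb).2 with _ | k
            · rfl
            · exact absurd (pvContains_size_ne (pvPB_inv curb k hk)) (by simpa using hs)
          have hcur : (pvPB curb).1 = PySem.Dict.empty := by
            rcases hd : (pvPB curb).1 with ⟨items⟩
            rw [hd] at hi; simp only at hi; subst hi; rfl
          rw [hcur, hck]
          have := ih [] recs
          simp only [hnil] at this
          rw [this]
          have hne : ((pvParseBlock curb).isEmpty) = true := by
            rw [hpb2, hi]; rfl
          simp [hne]
    · -- non-blank line: both sides extend the open block
      rw [pvLoopA_step l ls recs _ _ h]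
      have hpb : pvPB (curb ++ [l]) = pvStepB (pvPB curb) l := by
        simp [pvPB, List.foldl_append]
      rw [show (pvStepB ((pvPB curb).1, (pvPB curb).2) l) = pvStepB (pvPB curb) l from rfl,
        ← hpb, ih (curb ++ [l]) recs, pvBlocksLoop]
      simp [h]

-- ===== VERDICT (by name: the statement is the Claim_ definition above) =====
theorem parse_pacman_query_py_spec : Claim_equal_parse_pacman_query_py := by
  intro output _
  unfold Spec_parse_pacman_query_py parse_pacman_query_py parse_pacman_query_py_alt
    pvSplitBlocks
  rw [pvSplitBlocks_loop (PySem.Str.splitlines output) [] []]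
  have := pvMain (PySem.Str.splitlines output) [] []
  simp only [pvPB, List.foldl_nil] at this
  simpa using this
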